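-- pv_equiv track=rewrite | github.com/neil-wang-global/velpos | backend/ohs/http/memory_router.py | _parse_rule_markdown
-- ===== SOURCE A (Python) =====
-- def _parse_rule_markdown(raw: str) -> tuple[list[str], str]:
--     if not raw.startswith("---\n"):
--         return [], raw
--     end = raw.find("\n---", 4)
--     if end < 0:
--         return [], raw
--     frontmatter = raw[4:end].splitlines()
--     content_start = end + len("\n---")
--     if raw[content_start:content_start + 1] == "\n":
--         content_start += 1
--     paths = []
--     in_paths = False
--     for line in frontmatter:
--         stripped = line.strip()
--         if stripped == "paths:":
--             in_paths = True
--             continue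
--         if in_paths and stripped.startswith("-"):
--             paths.append(stripped[1:].strip().strip('"').strip("'"))
--         elif in_paths and stripped:
--             in_paths = False
--     return paths, raw[content_start:]
-- ===== SOURCE B (Python) =====
-- def _parse_rule_markdown(raw: str) -> tuple[list[str], str]:
--     if not raw.startswith("---\n"):
--         return [], raw
--     end = raw.find("\n---", 4)
--     if end < 0:
--         return [], raw
--     content_start = end + 4
--     if raw[content_start:content_start + 1] == "\n":
--         content_start += 1
--     lines = [l.strip() for l in raw[4:end].splitlines()]
--
--     def governed(i: int) -> bool:
--         # a dash item belongs to a paths block iff the nearest preceding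
--         # "decisive" line (a 'paths:' marker or any other non-blank,
--         # non-dash line) is the 'paths:' marker
--         for j in range(i - 1, -1, -1):
--             s = lines[j]
--             if s == "paths:":
--                 return True
--             if s and not s.startswith("-"):
--                 return False
--         return False
--
--     paths = [s[1:].strip().strip('"').strip("'")
--              for i, s in enumerate(lines)
--              if s.startswith("-") and governed(i)]
--     return paths, raw[content_start:]
-- ===== Notes on version B (the rewrite author's own statement) =====
-- stated objective: alternative
-- what changed: Replaces A's forward boolean-flag state machine with a declarative characterisation: each dash line is collected iff the nearest preceding decisive line (the 'paths:' marker or any non-blank non-dash line) is 'paths:', found by a per-item backward scan inside a comprehension.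
import Mathlib
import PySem

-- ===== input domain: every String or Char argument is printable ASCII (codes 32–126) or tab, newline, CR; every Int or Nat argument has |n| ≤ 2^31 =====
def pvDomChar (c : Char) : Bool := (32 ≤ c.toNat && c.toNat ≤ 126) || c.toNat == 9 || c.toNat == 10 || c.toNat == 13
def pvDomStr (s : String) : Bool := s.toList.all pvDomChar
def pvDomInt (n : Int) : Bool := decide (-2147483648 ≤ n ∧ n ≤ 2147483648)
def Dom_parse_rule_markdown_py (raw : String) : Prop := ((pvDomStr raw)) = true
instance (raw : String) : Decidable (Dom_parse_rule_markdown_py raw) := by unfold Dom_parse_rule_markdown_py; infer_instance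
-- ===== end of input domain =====

-- B replaces A's forward boolean-flag state machine by a declarative rule — collect a dash
-- line iff its nearest preceding decisive line is 'paths:' (per-item backward scan);
-- same results, different algorithm (objective: alternative).

-- shared quote-stripping chain: stripped[1:].strip().strip('"').strip("'")
def pvClean (s : String) : String :=
  PySem.Str.stripChars (PySem.Str.stripChars (PySem.Str.strip (PySem.Str.slice s (some 1) none)) "\"") "'"

-- ===== PORT A =====
-- A's loop body: state (paths, in_paths)
def pvStepA (st : List String × Bool) (line : String) : List String × Bool :=
  let stripped := PySem.Str.strip line
  if stripped = "paths:" then (st.1, true)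
  else if st.2 && PySem.Str.startswith stripped "-" then (st.1 ++ [pvClean stripped], st.2)
  else if st.2 && !(stripped == "") then (st.1, false)
  else st

def parse_rule_markdown_py (raw : String) : List String × String :=
  if !(PySem.Str.startswith raw "---\n") then ([], raw)
  else
    let e := PySem.Str.findFrom raw "\n---" 4
    if e < 0 then ([], raw)
    else
      let frontmatter := PySem.Str.splitlines (PySem.Str.slice raw (some 4) (some e))
      let cs0 := e + 4
      let cs := if PySem.Str.slice raw (some cs0) (some (cs0 + 1)) = "\n" then cs0 + 1 else cs0
      let st := frontmatter.foldl pvStepA ([], false)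
      (st.1, PySem.Str.slice raw (some cs) none)

-- ===== PORT B =====
-- Source B's `governed(i)` backward loop `for j in range(i-1,-1,-1)` visits lines[0..i-1]
-- back to front, i.e. the reversed prefix; ported as structural recursion on that list.
def pvGov : List String → Bool
  | [] => false
  | s :: rest =>
    if s = "paths:" then true
    else if !(s == "") && !(PySem.Str.startswith s "-") then false
    else pvGov rest

def parse_rule_markdown_py_alt (raw : String) : List String × String :=
  if !(PySem.Str.startswith raw "---\n") then ([], raw)
  else
    let e := PySem.Str.findFrom raw "\n---" 4
    if e < 0 then ([], raw)
    else
      let cs0 := e + 4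
      let cs := if PySem.Str.slice raw (some cs0) (some (cs0 + 1)) = "\n" then cs0 + 1 else cs0
      let lines := (PySem.Str.splitlines (PySem.Str.slice raw (some 4) (some e))).map PySem.Str.strip
      let paths := (PySem.List.enumerate lines).filterMap (fun p =>
        if PySem.Str.startswith p.2 "-" && pvGov ((lines.take p.1.toNat).reverse)
        then some (pvClean p.2) else none)
      (paths, PySem.Str.slice raw (some cs) none)

-- ===== PRECONDITION & SPEC =====
def Spec_parse_rule_markdown_py (raw : String) (out : List String × String) : Prop := out = parse_rule_markdown_py_alt raw
instance (raw : String) (out : List String × String) : Decidable (Spec_parse_rule_markdown_py raw out) := by unfold Spec_parse_rule_markdown_py; infer_instance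

-- ===== CLAIM =====
def Claim_equal_parse_rule_markdown_py : Prop := ∀ (raw : String), Dom_parse_rule_markdown_py raw → Spec_parse_rule_markdown_py raw (parse_rule_markdown_py raw)

-- ===== LEMMAS AND PROOFS =====

-- proof-side recursion: B's collection written with an explicit processed prefix
def pvCollectB (pre : List String) : List String → List String
  | [] => []
  | s :: rest =>
    (if PySem.Str.startswith s "-" && pvGov pre.reverse then [pvClean s] else [])
      ++ pvCollectB (pre ++ [s]) rest

-- A's step on an already-stripped line
def pvStep (st : List String × Bool) (s : String) : List String × Bool :=
  if s = "paths:" then (st.1, true)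
  else if st.2 && PySem.Str.startswith s "-" then (st.1 ++ [pvClean s], st.2)
  else if st.2 && !(s == "") then (st.1, false)
  else st

-- the 'paths:' marker is not blank and not a dash line
theorem pv_paths_dash : PySem.Str.startswith "paths:" "-" = false := by decide

-- A's flag at any point equals pvGov of the reversed processed prefix, and the accumulated
-- paths equal B's declarative collection
theorem pvLoop_eq (suf : List String) : ∀ (pre acc : List String),
    suf.foldl pvStep (acc, pvGov pre.reverse) = (acc ++ pvCollectB pre suf,
      pvGov ((pre ++ suf).reverse)) := by
  induction suf with
  | nil => intro pre acc; simp [pvCollectB]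
  | cons s rest ih =>
    intro pre acc
    have hrev : (pre ++ [s]).reverse = s :: pre.reverse := by simp
    simp only [List.foldl_cons, pvCollectB]
    by_cases hp : s = "paths:"
    · have hsw : PySem.Str.startswith s "-" = false := by rw [hp]; exact pv_paths_dash
      have hcond : (PySem.Str.startswith s "-" && pvGov pre.reverse) = false := by
        rw [hsw]; exact Bool.false_and _
      have h1 : pvStep (acc, pvGov pre.reverse) s = (acc, pvGov (pre ++ [s]).reverse) := by
        simp only [pvStep]
        rw [if_pos hp, hrev]
        simp only [pvGov]
        rw [if_pos hp]
      rw [h1, ih (pre ++ [s]) acc, hcond]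
      simp
    · by_cases hd : PySem.Str.startswith s "-" = true
      · have hc2 : (!(s == "") && !(PySem.Str.startswith s "-")) = false := by
          rw [hd]; simp
        have hgov : pvGov ((pre ++ [s]).reverse) = pvGov pre.reverse := by
          rw [hrev]; simp only [pvGov]
          rw [if_neg hp, if_neg (by rw [hc2]; exact Bool.false_ne_true)]
        by_cases hb : pvGov pre.reverse = true
        · have hcond : (PySem.Str.startswith s "-" && pvGov pre.reverse) = true := by
            rw [hd, hb]; rfl
          have h1 : pvStep (acc, pvGov pre.reverse) s
              = (acc ++ [pvClean s], pvGov (pre ++ [s]).reverse) := by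
            simp only [pvStep]
            rw [if_neg hp, if_pos (show (pvGov pre.reverse && PySem.Str.startswith s "-") = true by rw [hb, hd]; rfl), hgov]
          rw [h1, ih (pre ++ [s]) (acc ++ [pvClean s]), hcond]
          simp
        · have hbf : pvGov pre.reverse = false := Bool.eq_false_iff.mpr hb
          have hcond : (PySem.Str.startswith s "-" && pvGov pre.reverse) = false := by
            rw [hbf]; exact Bool.and_false _
          have h1 : pvStep (acc, pvGov pre.reverse) s = (acc, pvGov (pre ++ [s]).reverse) := by
            simp only [pvStep]
            rw [if_neg hp,
              if_neg (show ¬ (pvGov pre.reverse && PySem.Str.startswith s "-") = true by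
                rw [hbf, Bool.false_and]; exact Bool.false_ne_true),
              if_neg (show ¬ (pvGov pre.reverse && !(s == "")) = true by
                rw [hbf, Bool.false_and]; exact Bool.false_ne_true), hgov]
          rw [h1, ih (pre ++ [s]) acc, hcond]
          simp
      · have hsw : PySem.Str.startswith s "-" = false := Bool.eq_false_iff.mpr hd
        have hcond : (PySem.Str.startswith s "-" && pvGov pre.reverse) = false := by
          rw [hsw]; exact Bool.false_and _
        by_cases he : s = ""
        · have hbe : (s == "") = true := by rw [he]; rfl
          have hc2 : (!(s == "") && !(PySem.Str.startswith s "-")) = false := by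
            rw [hbe]; simp
          have hgov : pvGov ((pre ++ [s]).reverse) = pvGov pre.reverse := by
            rw [hrev]; simp only [pvGov]
            rw [if_neg hp, if_neg (by rw [hc2]; exact Bool.false_ne_true)]
          have h1 : pvStep (acc, pvGov pre.reverse) s = (acc, pvGov (pre ++ [s]).reverse) := by
            simp only [pvStep]
            rw [if_neg hp,
              if_neg (show ¬ (pvGov pre.reverse && PySem.Str.startswith s "-") = true by
                rw [hsw, Bool.and_false]; exact Bool.false_ne_true),
              if_neg (show ¬ (pvGov pre.reverse && !(s == "")) = true by
                rw [hbe, Bool.not_true, Bool.and_false]; exact Bool.false_ne_true), hgov]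
          rw [h1, ih (pre ++ [s]) acc, hcond]
          simp
        · have hbe : (s == "") = false := beq_eq_false_iff_ne.mpr he
          have hc2 : (!(s == "") && !(PySem.Str.startswith s "-")) = true := by
            rw [hbe, hsw]; rfl
          have hgov : pvGov ((pre ++ [s]).reverse) = false := by
            rw [hrev]; simp only [pvGov]
            rw [if_neg hp, if_pos hc2]
          by_cases hb : pvGov pre.reverse = true
          · have h1 : pvStep (acc, pvGov pre.reverse) s = (acc, pvGov (pre ++ [s]).reverse) := by
              simp only [pvStep]
              rw [if_neg hp,
                if_neg (show ¬ (pvGov pre.reverse && PySem.Str.startswith s "-") = true by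
                  rw [hsw, Bool.and_false]; exact Bool.false_ne_true),
                if_pos (show (pvGov pre.reverse && !(s == "")) = true by rw [hb, hbe]; rfl), hgov]
            rw [h1, ih (pre ++ [s]) acc, hcond]
            simp
          · have hbf : pvGov pre.reverse = false := Bool.eq_false_iff.mpr hb
            have h1 : pvStep (acc, pvGov pre.reverse) s = (acc, pvGov (pre ++ [s]).reverse) := by
              simp only [pvStep]
              rw [if_neg hp,
                if_neg (show ¬ (pvGov pre.reverse && PySem.Str.startswith s "-") = true by
                  rw [hbf, Bool.false_and]; exact Bool.false_ne_true),
                if_neg (show ¬ (pvGov pre.reverse && !(s == "")) = true by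
                  rw [hbf, Bool.false_and]; exact Bool.false_ne_true), hgov, hbf]
            rw [h1, ih (pre ++ [s]) acc, hcond]
            simp

-- B's filterMap over enumerate equals the explicit-prefix recursion
theorem pvEnum_eq (L : List String) : ∀ (suf pre : List String), pre ++ suf = L →
    (PySem.List.enumerate suf (pre.length : Int)).filterMap (fun p =>
        if PySem.Str.startswith p.2 "-" && pvGov ((L.take p.1.toNat).reverse)
        then some (pvClean p.2) else none)
      = pvCollectB pre suf := by
  intro suf
  induction suf with
  | nil => intro pre h; simp [PySem.List.enumerate, pvCollectB]
  | cons s rest ih =>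
    intro pre h
    rw [PySem.List.enumerate_cons, List.filterMap_cons]
    have htake : L.take (pre.length : Int).toNat = pre := by
      rw [← h]; simp
    have hnext : ((pre.length : Int) + 1) = (((pre ++ [s]).length : Int)) := by simp
    rw [htake, hnext, ih (pre ++ [s]) (by simpa using h)]
    simp only [pvCollectB]
    rcases Bool.eq_false_or_eq_true (PySem.Str.startswith s "-" && pvGov pre.reverse) with hc | hc
    · rw [hc]; simp
    · rw [hc]; simp

-- ===== VERDICT =====
set_option maxHeartbeats 1000000 in
theorem parse_rule_markdown_py_spec : Claim_equal_parse_rule_markdown_py := by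
  intro raw _
  unfold Spec_parse_rule_markdown_py parse_rule_markdown_py parse_rule_markdown_py_alt
  cases h1 : PySem.Str.startswith raw "---\n" with
  | false => simp
  | true =>
    simp only [Bool.not_true, if_neg Bool.false_ne_true]
    by_cases h2 : PySem.Str.findFrom raw "\n---" 4 < 0
    · simp only [if_pos h2]
    · simp only [if_neg h2]
      refine congrArg₂ Prod.mk ?_ rfl
      set lines := (PySem.Str.splitlines (PySem.Str.slice raw (some 4)
        (some (PySem.Str.findFrom raw "\n---" 4)))).map PySem.Str.strip with hl
      have hA : (PySem.Str.splitlines (PySem.Str.slice raw (some 4)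
          (some (PySem.Str.findFrom raw "\n---" 4)))).foldl pvStepA ([], false)
          = lines.foldl pvStep ([], false) := by
        rw [hl, List.foldl_map]; rfl
      rw [hA]
      have h0 : (([] : List String), false) = (([] : List String), pvGov ([] : List String).reverse) := by
        simp [pvGov]
      rw [h0, pvLoop_eq lines [] []]
      have := pvEnum_eq lines lines [] (by simp)
      simp only [List.length_nil, Int.ofNat_zero] at this
      simp [← this]
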